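-- pv_equiv track=rewrite | github.com/Ezrastrading/Ezras-trading-ai | trading-ai/src/trading_ai/automation/strategy_risk_bucket.py | _bucket_from_recent
-- ===== SOURCE A (Python) =====
-- from typing import Any, Dict, List
--
-- def _bucket_from_recent(recent: List[str]) -> str:
--     recent = [str(x).lower() for x in recent if x]
--     recent = [x for x in recent if x in ("win", "loss")]
--     if not recent:
--         return "NORMAL"
--     last3 = recent[-3:]
--     last5 = recent[-5:]
--     losses3 = sum(1 for x in last3 if x == "loss")
--     losses5 = sum(1 for x in last5 if x == "loss")
--     if losses5 >= 4:
--         return "BLOCKED"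
--     if losses3 >= 2:
--         return "REDUCED"
--     return "NORMAL"
-- ===== SOURCE B (Python) =====
-- def _bucket_from_recent(recent):
--     # Single reverse pass: collect at most the 5 most recent valid results, newest first.
--     buf = []
--     for x in reversed(recent):
--         if x:
--             v = str(x).lower()
--             if v in ("win", "loss"):
--                 buf.append(v)
--                 if len(buf) == 5:
--                     break
--     if not buf:
--         return "NORMAL"
--     losses5 = buf.count("loss")
--     losses3 = buf[:3].count("loss")
--     if losses5 >= 4:
--         return "BLOCKED"
--     if losses3 >= 2:
--         return "REDUCED"
--     return "NORMAL"
-- ===== Notes on version B (the rewrite author's own statement) =====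
-- stated objective: alternative
-- what changed: Instead of building two full cleaned lists and slicing their tails, B scans the input once in reverse, stops as soon as 5 valid results are buffered, and counts losses directly in that buffer (whole buffer = last 5, first 3 of buffer = last 3).
import Mathlib
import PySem

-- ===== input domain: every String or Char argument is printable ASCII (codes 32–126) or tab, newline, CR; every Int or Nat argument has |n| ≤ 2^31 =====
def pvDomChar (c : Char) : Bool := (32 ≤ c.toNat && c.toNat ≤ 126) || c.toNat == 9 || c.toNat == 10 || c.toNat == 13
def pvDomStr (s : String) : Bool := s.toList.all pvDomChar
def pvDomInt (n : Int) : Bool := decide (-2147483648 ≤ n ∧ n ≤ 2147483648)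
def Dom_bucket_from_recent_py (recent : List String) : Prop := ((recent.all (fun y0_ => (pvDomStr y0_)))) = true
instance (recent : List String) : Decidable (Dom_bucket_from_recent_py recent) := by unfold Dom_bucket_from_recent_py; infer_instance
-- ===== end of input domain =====

-- B scans the input once in reverse, buffering at most the 5 most recent valid
-- results and counting losses in that buffer, instead of A's clean-then-slice
-- passes over the whole list (objective: alternative decomposition).

-- ===== PORT A =====
def bucket_from_recent_py (recent : List String) : String :=
  -- recent = [str(x).lower() for x in recent if x]
  let r1 := (recent.filter (fun x => !(x == ""))).map PySem.Str.lower
  -- recent = [x for x in recent if x in ("win", "loss")]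
  let r2 := r1.filter (fun x => x == "win" || x == "loss")
  if r2.isEmpty then "NORMAL"
  else
    let last3 := PySem.List.slice r2 (some (-3)) none
    let last5 := PySem.List.slice r2 (some (-5)) none
    let losses3 := last3.count "loss"
    let losses5 := last5.count "loss"
    if losses5 ≥ 4 then "BLOCKED"
    else if losses3 ≥ 2 then "REDUCED"
    else "NORMAL"

-- ===== PORT B =====
-- the reverse loop of Source B: append valid lowered values to buf, break at 5
def altCollect : List String → List String → List String
  | [], buf => buf
  | x :: rest, buf =>
    if x ≠ "" then
      let v := PySem.Str.lower x
      if v = "win" ∨ v = "loss" then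
        let buf' := buf ++ [v]
        if buf'.length = 5 then buf' else altCollect rest buf'
      else altCollect rest buf
    else altCollect rest buf

def bucket_from_recent_py_alt (recent : List String) : String :=
  let buf := altCollect recent.reverse []
  if buf.isEmpty then "NORMAL"
  else
    let losses5 := buf.count "loss"
    let losses3 := (buf.take 3).count "loss"
    if losses5 ≥ 4 then "BLOCKED"
    else if losses3 ≥ 2 then "REDUCED"
    else "NORMAL"

-- ===== PRECONDITION & SPEC =====
def Spec_bucket_from_recent_py (recent : List String) (out : String) : Prop := out = bucket_from_recent_py_alt recent
instance (recent : List String) (out : String) : Decidable (Spec_bucket_from_recent_py recent out) := by unfold Spec_bucket_from_recent_py; infer_instance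

-- ===== CLAIM (what is proved, stated in full; the proofs are below) =====
def Claim_equal_bucket_from_recent_py : Prop := ∀ (recent : List String), Dom_bucket_from_recent_py recent → Spec_bucket_from_recent_py recent (bucket_from_recent_py recent)

-- ===== LEMMAS AND PROOFS =====

-- A's cleaned list (both filters plus the lowering), as a named function
def pvClean (l : List String) : List String :=
  ((l.filter (fun x => !(x == ""))).map PySem.Str.lower).filter (fun x => x == "win" || x == "loss")

lemma pvClean_cons (x : String) (l : List String) :
    pvClean (x :: l) =
      if x ≠ "" then
        (if PySem.Str.lower x = "win" ∨ PySem.Str.lower x = "loss"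
          then PySem.Str.lower x :: pvClean l else pvClean l)
      else pvClean l := by
  simp only [pvClean, List.filter_cons]
  by_cases hx : x = "" <;>
    by_cases hv : PySem.Str.lower x = "win" ∨ PySem.Str.lower x = "loss" <;>
      simp [hx, hv]

lemma pvClean_reverse (l : List String) : pvClean l.reverse = (pvClean l).reverse := by
  simp [pvClean, List.filter_reverse, List.map_reverse]

-- invariant of B's reverse loop
lemma altCollect_eq (l : List String) : ∀ (buf : List String), buf.length < 5 →
    altCollect l buf = buf ++ (pvClean l).take (5 - buf.length) := by
  induction l with
  | nil => intro buf _; simp [altCollect, pvClean]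
  | cons x rest ih =>
    intro buf hb
    rw [altCollect, pvClean_cons]
    by_cases hx : x = ""
    · rw [if_neg (by simpa using hx), if_neg (by simpa using hx)]
      exact ih buf hb
    · rw [if_pos hx, if_pos hx]
      by_cases hv : PySem.Str.lower x = "win" ∨ PySem.Str.lower x = "loss"
      · rw [if_pos hv, if_pos hv]
        simp only [List.length_append, List.length_cons, List.length_nil, Nat.zero_add]
        by_cases h5 : buf.length + 1 = 5
        · rw [if_pos h5]
          have h1 : 5 - buf.length = 1 := by omega
          rw [h1]
          simp
        · rw [if_neg h5]
          rw [ih (buf ++ [PySem.Str.lower x]) (by simp only [List.length_append,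
            List.length_cons, List.length_nil, Nat.zero_add]; omega)]
          have htk : 5 - buf.length = (5 - (buf.length + 1)) + 1 := by omega
          rw [htk, List.take_succ_cons]
          simp [List.length_append]
      · rw [if_neg hv, if_neg hv]
        exact ih buf hb

lemma buf_eq (recent : List String) :
    altCollect recent.reverse [] = (pvClean recent).reverse.take 5 := by
  rw [altCollect_eq recent.reverse [] (by simp)]
  simp [pvClean_reverse]

-- the two decision cascades agree once both are expressed over the cleaned list r2
lemma pvMain (r2 : List String) :
    (if r2.isEmpty then "NORMAL"
     else if (PySem.List.slice r2 (some (-5)) none).count "loss" ≥ 4 then "BLOCKED"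
     else if (PySem.List.slice r2 (some (-3)) none).count "loss" ≥ 2 then "REDUCED"
     else "NORMAL")
    =
    (if (r2.reverse.take 5).isEmpty then "NORMAL"
     else if (r2.reverse.take 5).count "loss" ≥ 4 then "BLOCKED"
     else if ((r2.reverse.take 5).take 3).count "loss" ≥ 2 then "REDUCED"
     else "NORMAL") := by
  have c5 : (r2.reverse.take 5).count "loss"
      = (PySem.List.slice r2 (some (-5)) none).count "loss" := by
    rw [PySem.List.slice_from_neg_ofNat r2 5 (by omega), List.take_reverse, List.count_reverse]
  have c3 : ((r2.reverse.take 5).take 3).count "loss"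
      = (PySem.List.slice r2 (some (-3)) none).count "loss" := by
    rw [List.take_take]
    norm_num
    rw [PySem.List.slice_from_neg_ofNat r2 3 (by omega), List.take_reverse, List.count_reverse]
  have he : (r2.reverse.take 5).isEmpty = r2.isEmpty := by
    cases r2 <;> simp
  rw [c5, c3, he]

-- ===== VERDICT (by name: the statement is the Claim_ definition above) =====
theorem bucket_from_recent_py_spec : Claim_equal_bucket_from_recent_py := by
  intro recent _
  unfold Spec_bucket_from_recent_py bucket_from_recent_py bucket_from_recent_py_alt
  dsimp only
  rw [buf_eq]
  exact pvMain (pvClean recent)
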